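-- pv_equiv track=rewrite | github.com/MrBrantCode/unitest_baseline | mut_generate/mist_train_cf/cf_30273/solution.py | sliding_window_count
-- ===== SOURCE A (Python) =====
-- def sliding_window_count(window_size, threshold, numbers):
--     """
--     Counts the number of times the sum of integers in a sliding window
--     of size `window_size` is greater than or equal to the given `threshold`.
--
--     Args:
--         window_size (int): Size of the sliding window.
--         threshold (int): The threshold value.
--         numbers (list): A list of integers.
--
--     Returns:
--         int: The count of times the sum of integers in the sliding window
--              is greater than or equal to the threshold.
--     """
--     count = 0
--     window_sum = sum(numbers[:window_size])
--     count += 1 if window_sum >= threshold else 0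
--
--     for i in range(window_size, len(numbers)):
--         window_sum = window_sum - numbers[i - window_size] + numbers[i]
--         count += 1 if window_sum >= threshold else 0
--
--     return count
-- ===== SOURCE B (Python) =====
-- def sliding_window_count(window_size, threshold, numbers):
--     n = len(numbers)
--     prefix = [0]
--     total = 0
--     for x in numbers:
--         total += x
--         prefix.append(total)
--     count = 1 if prefix[min(window_size, n)] >= threshold else 0
--     for i in range(window_size, n):
--         if prefix[i + 1] - prefix[i + 1 - window_size] >= threshold:
--             count += 1
--     return count
-- ===== Notes on version B (the rewrite author's own statement) =====
-- stated objective: alternative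
-- what changed: Replaces the maintained running window sum with a prefix-sum table built in one pass; each window sum (including the first) is then a difference of two table entries instead of an incrementally updated accumulator.
import Mathlib
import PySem

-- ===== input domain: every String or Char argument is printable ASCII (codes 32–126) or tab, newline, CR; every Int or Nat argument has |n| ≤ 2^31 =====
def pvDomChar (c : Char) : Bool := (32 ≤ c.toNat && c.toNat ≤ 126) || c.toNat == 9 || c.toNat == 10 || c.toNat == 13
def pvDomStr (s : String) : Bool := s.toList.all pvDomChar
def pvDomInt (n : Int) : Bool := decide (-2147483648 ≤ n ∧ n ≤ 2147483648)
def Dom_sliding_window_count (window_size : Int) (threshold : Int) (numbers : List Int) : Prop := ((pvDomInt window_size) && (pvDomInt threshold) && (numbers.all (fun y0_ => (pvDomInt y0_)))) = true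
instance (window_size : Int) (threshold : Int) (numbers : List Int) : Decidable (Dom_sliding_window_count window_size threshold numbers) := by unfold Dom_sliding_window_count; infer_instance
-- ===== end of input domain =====

-- B replaces A's maintained running window sum with a one-pass prefix-sum table (alternative decomposition, same cost).

-- ===== PORT A =====
def sliding_window_count (window_size : Int) (threshold : Int) (numbers : List Int) : Int :=
  let window_sum : Int := (PySem.List.slice numbers none (some window_size)).sum
  let count : Int := 0 + (if window_sum ≥ threshold then 1 else 0)
  let st := (PySem.List.pyRange window_size numbers.length 1).foldl
    (fun (st : Int × Int) (i : Int) =>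
      let ws := st.1 - PySem.List.pyGetD numbers (i - window_size) 0 + PySem.List.pyGetD numbers i 0
      (ws, st.2 + (if ws ≥ threshold then 1 else 0)))
    (window_sum, count)
  st.2

-- ===== PORT B =====
def sliding_window_count_alt (window_size : Int) (threshold : Int) (numbers : List Int) : Int :=
  let n : Int := numbers.length
  let pt := numbers.foldl
    (fun (pt : List Int × Int) x =>
      let total := pt.2 + x
      (pt.1 ++ [total], total))
    ([0], 0)
  let pre := pt.1
  let count : Int := if PySem.List.pyGetD pre (min window_size n) 0 ≥ threshold then 1 else 0
  (PySem.List.pyRange window_size n 1).foldl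
    (fun c i =>
      if PySem.List.pyGetD pre (i + 1) 0 - PySem.List.pyGetD pre (i + 1 - window_size) 0 ≥ threshold then c + 1 else c)
    count

-- ===== PRECONDITION & SPEC =====
-- On window_size < 0 the Python A always raises IndexError (numbers[i - window_size] or a
-- negative numbers[i] runs past the list); Pre_ excludes exactly those inputs.
def Pre_sliding_window_count (window_size : Int) (threshold : Int) (numbers : List Int) : Prop :=
  0 ≤ window_size
instance (window_size : Int) (threshold : Int) (numbers : List Int) : Decidable (Pre_sliding_window_count window_size threshold numbers) := by unfold Pre_sliding_window_count; infer_instance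
def pvWitness_sliding_window_count : Int × Int × List Int := (2, 5, [1, 4, 2, 3])

def Spec_sliding_window_count (window_size : Int) (threshold : Int) (numbers : List Int) (out : Int) : Prop := out = sliding_window_count_alt window_size threshold numbers
instance (window_size : Int) (threshold : Int) (numbers : List Int) (out : Int) : Decidable (Spec_sliding_window_count window_size threshold numbers out) := by unfold Spec_sliding_window_count; infer_instance

-- ===== CLAIM (what is proved, stated in full; the proofs are below) =====
def Claim_equal_sliding_window_count : Prop := ∀ (window_size : Int) (threshold : Int) (numbers : List Int), Dom_sliding_window_count window_size threshold numbers → Pre_sliding_window_count window_size threshold numbers → Spec_sliding_window_count window_size threshold numbers (sliding_window_count window_size threshold numbers)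

-- ===== LEMMAS AND PROOFS =====

-- partial sums of numbers, clamped at the ends by List.take
def pvS (numbers : List Int) (k : Int) : Int := (numbers.take k.toNat).sum

-- B's prefix-building foldl, generalized
lemma pv_prefix_foldl (l : List Int) : ∀ (p : List Int) (t : Int),
    l.foldl (fun (pt : List Int × Int) x => (pt.1 ++ [pt.2 + x], pt.2 + x)) (p, t)
      = (p ++ (List.range l.length).map (fun k => t + (l.take (k + 1)).sum), t + l.sum) := by
  induction l with
  | nil => simp
  | cons x xs ih =>
    intro p t
    rw [List.foldl_cons]
    refine Eq.trans (ih (p ++ [t + x]) (t + x)) ?_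
    simp only [List.length_cons, List.range_succ_eq_map, List.map_cons, List.map_map,
      List.append_assoc, List.singleton_append, Prod.mk.injEq]
    refine ⟨?_, by simp only [List.sum_cons]; ring⟩
    congr 1
    simp only [List.cons.injEq]
    refine ⟨by simp, ?_⟩
    apply List.map_congr_left
    intro k _
    simp only [Function.comp_apply, List.take_succ_cons, List.sum_cons]
    ring

lemma pv_prefix_eq (numbers : List Int) :
    (numbers.foldl (fun (pt : List Int × Int) x => (pt.1 ++ [pt.2 + x], pt.2 + x)) ([0], 0)).1
      = (List.range (numbers.length + 1)).map (fun k => ((numbers.take k).sum : Int)) := by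
  rw [pv_prefix_foldl]
  simp [List.range_succ_eq_map, List.map_map, Function.comp]

lemma pv_prefix_getD (numbers : List Int) (k : Int) (hk : 0 ≤ k) (hk' : k ≤ numbers.length) :
    PySem.List.pyGetD ((List.range (numbers.length + 1)).map (fun k => ((numbers.take k).sum : Int))) k 0
      = pvS numbers k := by
  rw [PySem.List.pyGetD_eq_getElem _ _ hk (by simp; omega)]
  rw [List.getElem_map, List.getElem_range]
  rfl

lemma pvS_succ (numbers : List Int) (k : Int) (h0 : 0 ≤ k) (h1 : k < numbers.length) :
    pvS numbers (k + 1) = pvS numbers k + PySem.List.pyGetD numbers k 0 := by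
  have hk : k.toNat < numbers.length := by omega
  rw [PySem.List.pyGetD_eq_getElem _ _ h0 (by omega)]
  unfold pvS
  have : (k + 1).toNat = k.toNat + 1 := by omega
  rw [this, List.sum_take_succ _ _ hk]

-- the main loop: A's (window_sum, count) fold projects to the count fold over window-sum differences
lemma pv_loop (w t : Int) (nums : List Int) (hw : 0 ≤ w) :
    ∀ (m : Nat) (j c : Int), w ≤ j → m = ((nums.length : Int) - j).toNat →
    ((PySem.List.pyRange j nums.length 1).foldl
        (fun (st : Int × Int) (i : Int) =>
          (st.1 - PySem.List.pyGetD nums (i - w) 0 + PySem.List.pyGetD nums i 0,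
            st.2 + if st.1 - PySem.List.pyGetD nums (i - w) 0 + PySem.List.pyGetD nums i 0 ≥ t then 1 else 0))
        (pvS nums j - pvS nums (j - w), c)).2
      = (PySem.List.pyRange j nums.length 1).foldl
          (fun c i => if pvS nums (i + 1) - pvS nums (i + 1 - w) ≥ t then c + 1 else c) c := by
  intro m
  induction m with
  | zero =>
    intro j c hj hm
    rw [PySem.List.pyRange_one_eq_nil (by omega)]
    rfl
  | succ m ih =>
    intro j c hj hm
    by_cases hjn : j < (nums.length : Int)
    · rw [PySem.List.pyRange_one_cons hjn]
      simp only [List.foldl_cons]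
      have e1 : pvS nums j - pvS nums (j - w) - PySem.List.pyGetD nums (j - w) 0 + PySem.List.pyGetD nums j 0
          = pvS nums (j + 1) - pvS nums (j + 1 - w) := by
        rw [pvS_succ nums j (by omega) hjn]
        have h2 : j + 1 - w = (j - w) + 1 := by ring
        rw [h2, pvS_succ nums (j - w) (by omega) (by omega)]
        ring
      rw [e1]
      rw [ih (j + 1) (c + (if pvS nums (j + 1) - pvS nums (j + 1 - w) ≥ t then 1 else 0)) (by omega) (by omega)]
      congr 1
      split <;> omega
    · rw [PySem.List.pyRange_one_eq_nil (by omega)]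
      rfl

lemma pv_take_min (numbers : List Int) (w : Int) (hw : 0 ≤ w) :
    numbers.take (min w (numbers.length : Int)).toNat = numbers.take w.toNat := by
  rcases le_or_gt w (numbers.length : Int) with h | h
  · rw [min_eq_left h]
  · rw [min_eq_right (le_of_lt h)]
    rw [List.take_of_length_le (by omega), List.take_of_length_le (by omega)]

-- ===== VERDICT (by name: the statement is the Claim_ definition above) =====
theorem sliding_window_count_spec : Claim_equal_sliding_window_count := by
  intro w t nums _ hw
  have hw' : 0 ≤ w := hw
  unfold Spec_sliding_window_count sliding_window_count sliding_window_count_alt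
  simp only []
  rw [pv_prefix_eq]
  have hpre : ∀ k : Int, 0 ≤ k → k ≤ (nums.length : Int) →
      PySem.List.pyGetD ((List.range (nums.length + 1)).map (fun k => ((nums.take k).sum : Int))) k 0 = pvS nums k :=
    fun k h1 h2 => pv_prefix_getD nums k h1 h2
  have hfirst : (PySem.List.slice nums none (some w)).sum = pvS nums (min w (nums.length : Int)) := by
    rw [PySem.List.slice_to _ hw']
    unfold pvS
    rw [pv_take_min nums w hw']
  rw [hpre (min w (nums.length : Int)) (by omega) (min_le_right _ _)]
  have hB := PySem.List.foldl_congr_mem (PySem.List.pyRange w (nums.length : Int) 1)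
    (fun (c i : Int) => if PySem.List.pyGetD ((List.range (nums.length + 1)).map (fun k => ((nums.take k).sum : Int))) (i + 1) 0 - PySem.List.pyGetD ((List.range (nums.length + 1)).map (fun k => ((nums.take k).sum : Int))) (i + 1 - w) 0 ≥ t then c + 1 else c)
    (fun (c i : Int) => if pvS nums (i + 1) - pvS nums (i + 1 - w) ≥ t then c + 1 else c)
    (if pvS nums (min w (nums.length : Int)) ≥ t then 1 else 0)
    (by
      intro acc i hi
      rw [PySem.List.mem_pyRange_one] at hi
      have h1 := hpre (i + 1) (by omega) (by omega)
      have h2 := hpre (i + 1 - w) (by omega) (by omega)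
      simp only [h1, h2])
  rw [hB, hfirst]
  have hsw : pvS nums (min w (nums.length : Int)) = pvS nums w := by
    unfold pvS; rw [pv_take_min nums w hw']
  rw [hsw]
  have hmain := pv_loop w t nums hw' ((nums.length : Int) - w).toNat w
    (0 + (if pvS nums w ≥ t then 1 else 0)) (le_refl w) rfl
  have h0 : pvS nums (w - w) = 0 := by
    have hww : w - w = 0 := by ring
    rw [hww]; rfl
  rw [h0, sub_zero] at hmain
  rw [hmain]
  congr 1
  omega
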